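-- pv_equiv track=rewrite | github.com/volcengine/verl | atropos/environments/intern_bootcamp/internbootcamp_lib/internbootcamp/bootcamp/caupontrouge/caupontrouge.py | _get_all_candidates
-- ===== SOURCE A (Python) =====
-- from itertools import combinations
--
-- def _get_all_candidates(s, m):
--     """优化分割点生成算法"""
--     candidates = set()
--     n = len(s)
--
--     # 使用迭代器避免内存爆炸
--     for splits in combinations(range(1, n), m-1):
--         parts = []
--         prev = 0
--         for pos in sorted(splits):
--             parts.append(s[prev:pos])
--             prev = pos
--         parts.append(s[prev:])
--         candidates.add(min(parts))
--
--     return sorted(candidates)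
-- ===== SOURCE B (Python) =====
-- def _get_all_candidates(s, m):
--     """Bottom-up DP over suffixes: dp[i] = set of possible minimum parts when
--     splitting s[i:] into k pieces; k grows from 1 to m. Polynomial instead of
--     enumerating all C(n-1, m-1) split combinations."""
--     n = len(s)
--     if m == 1:
--         return [s]
--     if n < m:
--         return []
--     dp = [{s[i:]} for i in range(n)]
--     for _ in range(m - 1):
--         dp = [{min(s[i:j], x) for j in range(i + 1, n) for x in dp[j]}
--               for i in range(n)]
--     return sorted(dp[0])
-- ===== Notes on version B (the rewrite author's own statement) =====
-- stated objective: alternative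
-- what changed: Replaces brute-force enumeration of all C(n-1,m-1) split-point combinations with a bottom-up DP over suffixes (dp[i] = set of achievable minimum parts of s[i:] for the current part count).
-- outside the precondition, e.g. on _get_all_candidates('ab', 0): A raises ValueError, B returns ['ab']
import Mathlib
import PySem

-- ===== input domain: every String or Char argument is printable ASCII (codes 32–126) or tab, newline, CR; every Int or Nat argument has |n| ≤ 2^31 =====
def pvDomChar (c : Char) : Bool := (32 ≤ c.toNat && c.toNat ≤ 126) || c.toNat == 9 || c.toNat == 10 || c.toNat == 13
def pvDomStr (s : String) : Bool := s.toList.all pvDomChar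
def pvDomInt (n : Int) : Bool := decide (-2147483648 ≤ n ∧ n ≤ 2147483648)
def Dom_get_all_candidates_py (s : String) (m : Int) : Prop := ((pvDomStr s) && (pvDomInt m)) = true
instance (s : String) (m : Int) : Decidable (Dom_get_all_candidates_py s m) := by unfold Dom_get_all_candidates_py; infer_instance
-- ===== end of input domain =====

-- B replaces A's enumeration of all C(n-1,m-1) split combinations by a bottom-up DP
-- over suffixes (a different algorithm; equal output proved on all m >= 1).

-- ===== PORT A =====
-- the inner 'for pos in sorted(splits): parts.append(s[prev:pos]); prev = pos' loop
-- followed by 'parts.append(s[prev:])'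
def pvPartsFold (s : String) (splits : List Int) : List String :=
  let pp := splits.foldl
    (fun (pp : List String × Int) pos => (pp.1 ++ [PySem.Str.slice s (some pp.2) (some pos)], pos))
    (([] : List String), (0 : Int))
  pp.1 ++ [PySem.Str.slice s (some pp.2) none]

def get_all_candidates_py (s : String) (m : Int) : List String :=
  let n : Int := PySem.Str.len s
  let candidates : PySem.Set String :=
    (PySem.List.combinations (PySem.List.pyRange 1 n) (m - 1).toNat).foldl
      (fun cand splits =>
        let parts := pvPartsFold s (PySem.List.sorted splits (fun x => x))
        match PySem.List.min? parts (fun x => x) with   -- parts is never empty; none is unreachable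
        | some mn => PySem.Set.add cand mn
        | none => cand)
      PySem.Set.empty
  PySem.List.sorted candidates (fun x => x)

-- ===== PORT B =====
-- one round of the DP: dp ↦ [{min(s[i:j], x) for j in range(i+1,n) for x in dp[j]} for i in range(n)]
def pvStep (s : String) (n : Int) (dp : List (PySem.Set String)) : List (PySem.Set String) :=
  (PySem.List.pyRange 0 n).map (fun i =>
    PySem.Set.ofList ((PySem.List.pyRange (i + 1) n).flatMap (fun j =>
      (PySem.List.pyGetD dp j PySem.Set.empty).map
        (fun x => min (PySem.Str.slice s (some i) (some j)) x))))

def get_all_candidates_py_alt (s : String) (m : Int) : List String :=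
  let n : Int := PySem.Str.len s
  if m == 1 then [s]
  else if n < m then []
  else
    let dp0 : List (PySem.Set String) :=
      (PySem.List.pyRange 0 n).map (fun i => PySem.Set.ofList [PySem.Str.slice s (some i) none])
    let dp := (PySem.List.pyRange 0 (m - 1)).foldl (fun dp _ => pvStep s n dp) dp0
    PySem.List.sorted (PySem.List.pyGetD dp 0 PySem.Set.empty) (fun x => x)

-- ===== PRECONDITION & SPEC =====
-- Pre_ excludes m < 1, where A raises ValueError (combinations with negative r).
def Pre_get_all_candidates_py (s : String) (m : Int) : Prop := 1 ≤ m
instance (s : String) (m : Int) : Decidable (Pre_get_all_candidates_py s m) := by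
  unfold Pre_get_all_candidates_py; infer_instance

def pvWitness_get_all_candidates_py : String × Int := ("abcab", 3)

def Spec_get_all_candidates_py (s : String) (m : Int) (out : List String) : Prop :=
  out = get_all_candidates_py_alt s m
instance (s : String) (m : Int) (out : List String) : Decidable (Spec_get_all_candidates_py s m out) := by
  unfold Spec_get_all_candidates_py; infer_instance

-- ===== CLAIM (what is proved, stated in full; the proofs are below) =====
def Claim_equal_get_all_candidates_py : Prop := ∀ (s : String) (m : Int),
  Dom_get_all_candidates_py s m → Pre_get_all_candidates_py s m →
  Spec_get_all_candidates_py s m (get_all_candidates_py s m)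

-- ===== LEMMAS AND PROOFS =====

-- the list of parts cut at positions i :: c, and its minimum
def pvPartsL (s : String) (i : Int) : List Int → List String
  | [] => [PySem.Str.slice s (some i) none]
  | j :: c => PySem.Str.slice s (some i) (some j) :: pvPartsL s j c

def pvMinParts (s : String) (i : Int) : List Int → String
  | [] => PySem.Str.slice s (some i) none
  | j :: c => min (PySem.Str.slice s (some i) (some j)) (pvMinParts s j c)

-- "t is the minimum part of some split of s[i:] into k+1 parts"
def pvAch (s : String) (k : Nat) (i : Int) (t : String) : Prop :=
  ∃ c : List Int, c.Sublist (PySem.List.pyRange (i + 1) (PySem.Str.len s)) ∧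
    c.length = k ∧ pvMinParts s i c = t

lemma pvPartsFold_eq (s : String) (c : List Int) : pvPartsFold s c = pvPartsL s 0 c := by
  suffices h : ∀ (c : List Int) (acc : List String) (i : Int),
      (c.foldl (fun (pp : List String × Int) pos =>
        (pp.1 ++ [PySem.Str.slice s (some pp.2) (some pos)], pos)) (acc, i)).1 ++
      [PySem.Str.slice s (some (c.foldl (fun (pp : List String × Int) pos =>
        (pp.1 ++ [PySem.Str.slice s (some pp.2) (some pos)], pos)) (acc, i)).2) none]
      = acc ++ pvPartsL s i c by
    simpa [pvPartsFold] using h c [] 0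
  intro c
  induction c with
  | nil => intro acc i; simp [pvPartsL]
  | cons j c ih => intro acc i; simp [List.foldl_cons, ih, pvPartsL]

lemma min?_pvPartsL (s : String) (c : List Int) (i : Int) :
    PySem.List.min? (pvPartsL s i c) (fun x => x) = some (pvMinParts s i c) := by
  induction c generalizing i with
  | nil => simp [pvPartsL, pvMinParts, PySem.List.min?_id_cons]
  | cons j c ih =>
    obtain ⟨y, t, hyt, hfold⟩ : ∃ y t, pvPartsL s j c = y :: t ∧ t.foldl min y = pvMinParts s j c := by
      cases c with
      | nil => exact ⟨_, [], rfl, rfl⟩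
      | cons j' c' =>
        have h := ih j
        rw [pvPartsL, PySem.List.min?_id_cons] at h
        exact ⟨_, _, rfl, Option.some.inj h⟩
    rw [pvPartsL, hyt, PySem.List.min?_id_cons, pvMinParts, ← hfold]
    congr 1
    rw [List.foldl_cons, ← List.foldl_assoc (op := min)]

lemma cons_sublist_pyRange_iff (i n j : Int) (c : List Int) :
    (j :: c).Sublist (PySem.List.pyRange (i + 1) n) ↔
      (i + 1 ≤ j ∧ j < n ∧ c.Sublist (PySem.List.pyRange (j + 1) n)) := by
  constructor
  · intro h
    have hj : j ∈ PySem.List.pyRange (i + 1) n := h.subset List.mem_cons_self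
    rw [PySem.List.mem_pyRange_one] at hj
    refine ⟨hj.1, hj.2, ?_⟩
    rw [PySem.List.pyRange_one_append (i + 1) (j + 1) n (by omega) (by omega),
        List.sublist_append_iff] at h
    obtain ⟨l₁, l₂, heq, h₁, h₂⟩ := h
    cases l₁ with
    | nil =>
      exfalso
      simp only [List.nil_append] at heq
      have hmem : j ∈ PySem.List.pyRange (j + 1) n := by
        rw [← heq] at h₂; exact h₂.subset List.mem_cons_self
      rw [PySem.List.mem_pyRange_one] at hmem; omega
    | cons a l₁ =>
      simp only [List.cons_append, List.cons.injEq] at heq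
      obtain ⟨ha, hc⟩ := heq
      rw [PySem.List.pyRange_one_succ_right (a := i + 1) (by omega),
          List.sublist_append_iff] at h₁
      obtain ⟨p, q, hpq, hp, hq⟩ := h₁
      cases p with
      | nil =>
        simp only [List.nil_append] at hpq
        rw [← hpq] at hq
        have hl1 : l₁ = [] := by
          have := hq.length_le; simp at this; omega
        rw [hc, hl1, List.nil_append]
        exact h₂
      | cons b p =>
        exfalso
        simp only [List.cons_append, List.cons.injEq] at hpq
        have hb : b ∈ PySem.List.pyRange (i + 1) j := hp.subset List.mem_cons_self
        rw [PySem.List.mem_pyRange_one] at hb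
        omega
  · rintro ⟨h1, h2, h3⟩
    rw [PySem.List.pyRange_one_append (i + 1) (j + 1) n (by omega) (by omega),
        PySem.List.pyRange_one_succ_right (a := i + 1) (by omega)]
    have hj : [j].Sublist (PySem.List.pyRange (i + 1) j ++ [j]) :=
      List.sublist_append_of_sublist_right (List.Sublist.refl _)
    simpa using hj.append h3

lemma pvAch_zero (s : String) (i : Int) (t : String) :
    pvAch s 0 i t ↔ t = PySem.Str.slice s (some i) none := by
  constructor
  · rintro ⟨c, _, hlen, hmin⟩
    rw [List.length_eq_zero_iff] at hlen
    subst hlen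
    exact hmin.symm
  · rintro rfl
    exact ⟨[], List.nil_sublist _, rfl, rfl⟩

lemma pvAch_succ (s : String) (k : Nat) (i : Int) (t : String) :
    pvAch s (k + 1) i t ↔
      ∃ j, i + 1 ≤ j ∧ j < PySem.Str.len s ∧
        ∃ y, pvAch s k j y ∧ t = min (PySem.Str.slice s (some i) (some j)) y := by
  constructor
  · rintro ⟨c, hsub, hlen, hmin⟩
    cases c with
    | nil => simp at hlen
    | cons j c =>
      rw [cons_sublist_pyRange_iff] at hsub
      obtain ⟨h1, h2, h3⟩ := hsub
      exact ⟨j, h1, h2, pvMinParts s j c, ⟨c, h3, by simpa using hlen, rfl⟩, hmin.symm⟩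
  · rintro ⟨j, h1, h2, y, ⟨c, hsub, hlen, hmin⟩, rfl⟩
    exact ⟨j :: c, (cons_sublist_pyRange_iff i _ j c).2 ⟨h1, h2, hsub⟩,
      by simp [hlen], by rw [pvMinParts, hmin]⟩

-- characterisation of A's candidate set
lemma candA_eq (s : String) (m : Int) :
    ((PySem.List.combinations (PySem.List.pyRange 1 (PySem.Str.len s)) (m - 1).toNat).foldl
      (fun cand splits =>
        let parts := pvPartsFold s (PySem.List.sorted splits (fun x => x))
        match PySem.List.min? parts (fun x => x) with
        | some mn => PySem.Set.add cand mn
        | none => cand)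
      PySem.Set.empty)
    = PySem.Set.ofList ((PySem.List.combinations (PySem.List.pyRange 1 (PySem.Str.len s))
        (m - 1).toNat).map (fun c => pvMinParts s 0 c)) := by
  rw [PySem.Set.ofList_eq_foldl, List.foldl_map]
  apply PySem.List.foldl_congr_mem
  intro acc c hc
  have hsorted : PySem.List.sorted c (fun x => x) = c := by
    apply PySem.List.sorted_eq_self_of_pairwise
    have := (PySem.List.pairwise_lt_pyRange_one 1 (PySem.Str.len s)).sublist
      (PySem.List.sublist_of_mem_combinations hc)
    exact this.imp (fun h => le_of_lt h)
  simp only [hsorted, pvPartsFold_eq, min?_pvPartsL]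

lemma mem_candA (s : String) (m : Int) (t : String) :
    t ∈ PySem.Set.ofList ((PySem.List.combinations (PySem.List.pyRange 1 (PySem.Str.len s))
        (m - 1).toNat).map (fun c => pvMinParts s 0 c)) ↔ pvAch s (m - 1).toNat 0 t := by
  rw [PySem.Set.mem_ofList, List.mem_map]
  constructor
  · rintro ⟨c, hc, rfl⟩
    rw [PySem.List.mem_combinations_iff] at hc
    exact ⟨c, by simpa using hc.1, hc.2, rfl⟩
  · rintro ⟨c, hsub, hlen, rfl⟩
    exact ⟨c, (PySem.List.mem_combinations_iff _ _ _).2 ⟨by simpa using hsub, hlen⟩, rfl⟩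

-- the dp fold is an iterate of pvStep
lemma dp_foldl_iterate (s : String) (n : Int) (k : Int) (hk : 0 ≤ k)
    (dp : List (PySem.Set String)) :
    (PySem.List.pyRange 0 k).foldl (fun dp _ => pvStep s n dp) dp = (pvStep s n)^[k.toNat] dp := by
  obtain ⟨j, rfl⟩ : ∃ j : Nat, k = (j : Int) := ⟨k.toNat, by omega⟩
  induction j with
  | zero => simp [PySem.List.pyRange_one_eq_nil]
  | succ j ih =>
    push_cast
    rw [PySem.List.pyRange_one_succ_right (by positivity), List.foldl_append]
    simp only [List.foldl_cons, List.foldl_nil]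
    rw [ih (by positivity)]
    rw [show ((j : Int) + 1).toNat = j + 1 by omega, Function.iterate_succ_apply']
    congr 1

-- the dp invariant
lemma dp_invariant (s : String) (k : Nat) (i : Int) (hi0 : 0 ≤ i) (hin : i < PySem.Str.len s)
    (x : String) :
    (x ∈ PySem.List.pyGetD
      ((pvStep s (PySem.Str.len s))^[k]
        ((PySem.List.pyRange 0 (PySem.Str.len s)).map
          (fun i => PySem.Set.ofList [PySem.Str.slice s (some i) none])))
      i PySem.Set.empty) ↔ pvAch s k i x := by
  induction k generalizing i x with
  | zero =>
    rw [Function.iterate_zero_apply, PySem.List.pyGetD_map_pyRange_of_nonneg _ _ _ _ hi0 hin,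
      pvAch_zero, PySem.Set.mem_ofList]
    simp
  | succ k ih =>
    rw [Function.iterate_succ_apply', pvStep,
      PySem.List.pyGetD_map_pyRange_of_nonneg _ _ _ _ hi0 hin,
      PySem.Set.mem_ofList, List.mem_flatMap, pvAch_succ]
    constructor
    · rintro ⟨j, hj, hx⟩
      rw [PySem.List.mem_pyRange_one] at hj
      rw [List.mem_map] at hx
      obtain ⟨y, hy, rfl⟩ := hx
      exact ⟨j, hj.1, hj.2, y, (ih j (by omega) hj.2 y).1 hy, rfl⟩
    · rintro ⟨j, h1, h2, y, hy, rfl⟩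
      refine ⟨j, PySem.List.mem_pyRange_one.2 ⟨h1, h2⟩, List.mem_map.2 ⟨y, ?_, rfl⟩⟩
      exact (ih j (by omega) h2 y).2 hy

-- dp entries are Nodup after at least one step
lemma dp_nodup (s : String) (k : Nat) (i : Int) (hi0 : 0 ≤ i) (hin : i < PySem.Str.len s) :
    (PySem.List.pyGetD
      ((pvStep s (PySem.Str.len s))^[k]
        ((PySem.List.pyRange 0 (PySem.Str.len s)).map
          (fun i => PySem.Set.ofList [PySem.Str.slice s (some i) none])))
      i PySem.Set.empty).Nodup := by
  cases k with
  | zero =>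
    rw [Function.iterate_zero_apply, PySem.List.pyGetD_map_pyRange_of_nonneg _ _ _ _ hi0 hin]
    exact PySem.Set.nodup_ofList _
  | succ k =>
    rw [Function.iterate_succ_apply', pvStep,
      PySem.List.pyGetD_map_pyRange_of_nonneg _ _ _ _ hi0 hin]
    exact PySem.Set.nodup_ofList _

-- ===== VERDICT (by name: the statement is the Claim_ definition above) =====
theorem get_all_candidates_py_spec : Claim_equal_get_all_candidates_py := by
  intro s m _hdom hm
  replace hm : (1 : Int) ≤ m := hm
  unfold Spec_get_all_candidates_py
  simp only [get_all_candidates_py, get_all_candidates_py_alt]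
  rw [candA_eq]
  by_cases hm1 : m = 1
  · subst hm1
    rw [if_pos (by decide)]
    norm_num [PySem.List.combinations_zero]
    have h1 : pvMinParts s 0 [] = s := by simp [pvMinParts, PySem.Str.slice]
    rw [h1]
    rw [PySem.Set.ofList_eq_self_of_nodup _ (by simp)]
    exact PySem.List.sorted_eq_self_of_pairwise _ _ (by simp)
  · rw [if_neg (by simp [hm1])]
    by_cases hnm : PySem.Str.len s < m
    · rw [if_pos hnm]
      rw [PySem.List.combinations_eq_nil_of_length_lt
        (PySem.List.pyRange 1 (PySem.Str.len s))
        (by rw [PySem.List.length_pyRange_one]; omega)]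
      simp
      rfl
    · rw [if_neg hnm]
      rw [dp_foldl_iterate s (PySem.Str.len s) (m - 1) (by omega)]
      rw [PySem.List.sorted_id_eq_sorted_id_iff_perm]
      rw [List.perm_ext_iff_of_nodup (PySem.Set.nodup_ofList _)
        (dp_nodup s _ 0 (by norm_num) (by omega))]
      intro t
      rw [mem_candA, dp_invariant s _ 0 (by norm_num) (by omega)]
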